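-- pv_equiv track=rewrite | github.com/ck3207/daily_scripts | TK/deal_enter_demo.py | deal_opetator
-- ===== SOURCE A (Python) =====
-- def deal_opetator(columns_info):
--     # table_columns_tmp = table_columns
--     count = columns_info.count("*")+columns_info.count("/")
--     while count:
--         for operator in ["*", "/"]:
--             try:
--                 index = columns_info.index(operator)
--                 left = columns_info.pop(index-1)
--                 middle = columns_info.pop(index-1)
--                 right = columns_info.pop(index-1)
--                 columns_info.insert(index-1, left+middle+right)
--             except ValueError:
--                 pass
--         count -= 1
--     return columns_info
-- ===== SOURCE B (Python) =====
-- def deal_opetator(columns_info):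
--     out = []
--     i = 0
--     n = len(columns_info)
--     while i < n:
--         tok = columns_info[i]
--         if tok == "*" or tok == "/":
--             left = out.pop()
--             out.append(left + tok + columns_info[i + 1])
--             i += 2
--         else:
--             out.append(tok)
--             i += 1
--     return out
-- ===== Notes on version B (the rewrite author's own statement) =====
-- stated objective: alternative
-- what changed: A repeatedly rescans the list with list.index and does triple pop/insert surgery once per operator, driven by exceptions; B makes a single left-to-right pass, merging each '*'/'/' token with the previous output element and the next input token.
-- outside the precondition, e.g. on deal_opetator(['a', '/', '*', 'b']): A returns ['a', '/*b'], B returns ['a/*', 'b']; on deal_opetator(['/', 'b', 'c']): A returns ['cb/'], B raises IndexError; on deal_opetator(['a', '*']): A raises IndexError, B raises IndexError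
import Mathlib
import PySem

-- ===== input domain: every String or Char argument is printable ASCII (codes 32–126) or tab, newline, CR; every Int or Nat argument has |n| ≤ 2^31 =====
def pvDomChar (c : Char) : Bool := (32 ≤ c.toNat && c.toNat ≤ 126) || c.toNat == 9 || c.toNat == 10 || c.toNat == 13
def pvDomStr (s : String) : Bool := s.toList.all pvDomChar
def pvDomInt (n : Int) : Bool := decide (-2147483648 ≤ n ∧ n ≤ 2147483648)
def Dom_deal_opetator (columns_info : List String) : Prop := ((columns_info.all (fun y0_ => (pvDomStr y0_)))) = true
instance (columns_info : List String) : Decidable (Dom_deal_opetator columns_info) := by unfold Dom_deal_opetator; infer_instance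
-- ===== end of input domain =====

-- B replaces A's exception-driven fixpoint of first-occurrence searches and triple pop/insert
-- surgery with a single left-to-right pass merging each operator token into the previous output
-- element. A mutates its argument in place (pop/insert); B does not — the equivalence proved
-- here is about the return value only.

-- ===== PORT A =====
-- one body of A's `try: index = l.index(op); three pops; insert` with `except ValueError: pass`;
-- where Python would raise IndexError (a pop out of range, excluded by Pre_) the port returns the
-- list as popped so far (A's value there is not claimed).
def pvMerge (op : String) (l : List String) : List String :=
  match PySem.List.index? l op with
  | none => l                    -- ValueError: pass
  | some idx =>
    match PySem.List.pop? l ((idx : Int) - 1) with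
    | none => l
    | some (left, l1) =>
      match PySem.List.pop? l1 ((idx : Int) - 1) with
      | none => l1
      | some (middle, l2) =>
        match PySem.List.pop? l2 ((idx : Int) - 1) with
        | none => l2
        | some (right, l3) => PySem.List.insert l3 ((idx : Int) - 1) (left ++ middle ++ right)

-- `while count: for operator in ["*", "/"]: …; count -= 1` — count iterations, each trying "*" then "/"
def pvLoopA : Nat → List String → List String
  | 0, l => l
  | n + 1, l => pvLoopA n (pvMerge "/" (pvMerge "*" l))

def deal_opetator (columns_info : List String) : List String :=
  pvLoopA (PySem.List.count columns_info "*" + PySem.List.count columns_info "/") columns_info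

-- ===== PORT B =====
-- `for tok in it: if tok in ("*","/"): out.append(out.pop() + tok + next(it)) else: out.append(tok)`;
-- where Python would raise (out.pop() on empty / next(it) exhausted, both excluded by Pre_) the port
-- stops and returns the accumulator (B's value there is not claimed).
def pvLoopB (out : List String) : List String → List String
  | [] => out
  | tok :: rest =>
    if tok == "*" || tok == "/" then
      match PySem.List.pop? out (-1) with
      | none => out              -- IndexError
      | some (left, out') =>
        match rest with
        | [] => out'             -- StopIteration
        | nxt :: rest' => pvLoopB (out' ++ [left ++ tok ++ nxt]) rest'
    else pvLoopB (out ++ [tok]) rest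

def deal_opetator_alt (columns_info : List String) : List String :=
  pvLoopB [] columns_info

-- ===== PRECONDITION & SPEC =====
def pvIsOp (s : String) : Bool := s == "*" || s == "/"

-- well-formed token list: no "*"/"/" token at either end or adjacent to another operator token,
-- and no operator token both of whose neighbours are empty strings
def pvWF : List String → Bool
  | [] => true
  | [x] => !pvIsOp x
  | x :: y :: rest =>
    if pvIsOp x then false
    else if pvIsOp y then
      match rest with
      | [] => false
      | z :: _ => !(x == "" && z == "") && pvWF rest
    else pvWF (y :: rest)

-- Pre_ excludes lists with a misplaced operator token (at an end, adjacent to another operator, or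
-- with both neighbours empty), on which A raises IndexError or returns an accidental value produced
-- by negative-index wraparound / merges that consume or create operator tokens.
def Pre_deal_opetator (columns_info : List String) : Prop := pvWF columns_info = true
instance (columns_info : List String) : Decidable (Pre_deal_opetator columns_info) := by unfold Pre_deal_opetator; infer_instance

def pvWitness_deal_opetator : List String := ["a", "*", "b", "c", "/", "d"]

def Spec_deal_opetator (columns_info : List String) (out : List String) : Prop := out = deal_opetator_alt columns_info
instance (columns_info : List String) (out : List String) : Decidable (Spec_deal_opetator columns_info out) := by unfold Spec_deal_opetator; infer_instance

-- ===== CLAIM (what is proved, stated in full; the proofs are below) =====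
def Claim_equal_deal_opetator : Prop := ∀ (columns_info : List String), Dom_deal_opetator columns_info → Pre_deal_opetator columns_info → Spec_deal_opetator columns_info (deal_opetator columns_info)

-- ===== LEMMAS AND PROOFS =====

-- canonical result: collapse every operand-(op-operand)* chain into one concatenated token
def pvCanon : List String → List String
  | [] => []
  | [x] => [x]
  | [x, y] => [x, y]
  | x :: y :: z :: rest =>
    if pvIsOp y then pvCanon ((x ++ y ++ z) :: rest)
    else x :: pvCanon (y :: z :: rest)
termination_by l => l.length

def pvNops (l : List String) : Nat := l.countP pvIsOp

theorem pvWF_cons3 (x y z : String) (t : List String) :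
    pvWF (x :: y :: z :: t) =
      (if pvIsOp x = true then false
       else if pvIsOp y = true then !(x == "" && z == "") && pvWF (z :: t)
       else pvWF (y :: z :: t)) := rfl

theorem pvWF_headNonOp {x : String} {t : List String} (h : pvWF (x :: t) = true) :
    pvIsOp x = false := by
  cases t with
  | nil => simpa [pvWF] using h
  | cons b t' =>
    by_cases hx : pvIsOp x = true
    · simp [pvWF, hx] at h
    · simpa using hx

theorem pvOp_len {y : String} (h : pvIsOp y = true) : y.length = 1 := by
  unfold pvIsOp at h
  rcases Bool.or_eq_true_iff.mp h with h1 | h1 <;>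
    · rw [show y = _ from (beq_iff_eq.mp h1)]; decide

theorem pvMergedFacts {x y z : String} (hy : pvIsOp y = true) (hne : ¬(x = "" ∧ z = "")) :
    pvIsOp (x ++ y ++ z) = false ∧ (x ++ y ++ z) ≠ "" := by
  have hlen : 2 ≤ (x ++ y ++ z).length := by
    have := pvOp_len hy
    simp [String.length_append, this]
    rcases not_and_or.mp hne with h | h
    · have : x.length ≠ 0 := fun h0 => h (String.length_eq_zero_iff.mp h0)
      omega
    · have : z.length ≠ 0 := fun h0 => h (String.length_eq_zero_iff.mp h0)
      omega
  constructor
  · unfold pvIsOp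
    simp only [Bool.or_eq_false_iff, beq_eq_false_iff_ne]
    constructor <;> · intro he; rw [he] at hlen; revert hlen; decide
  · intro he; rw [he] at hlen; revert hlen; decide

theorem pvWF_replaceHead {x N : String} {t : List String} (hN : pvIsOp N = false)
    (hN0 : N ≠ "") (h : pvWF (x :: t) = true) : pvWF (N :: t) = true := by
  cases t with
  | nil => simp [pvWF, hN]
  | cons b t' =>
    have hx : pvIsOp x = false := pvWF_headNonOp h
    simp only [pvWF] at h ⊢
    rw [if_neg (by simp [hx])] at h
    rw [if_neg (by simp [hN])]
    by_cases hb : pvIsOp b = true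
    · rw [if_pos hb] at h ⊢
      cases t' with
      | nil => simp at h
      | cons z t'' =>
        simp only [Bool.and_eq_true] at h ⊢
        refine ⟨by simp [hN0], h.2⟩
    · rw [if_neg hb] at h ⊢; exact h

theorem pvCanon_cons_nonop {a b : String} {t : List String} (hb : pvIsOp b = false) :
    pvCanon (a :: b :: t) = a :: pvCanon (b :: t) := by
  cases t with
  | nil => simp [pvCanon]
  | cons c t' => rw [pvCanon]; simp [hb]

-- decomposition at any operator occurrence of a well-formed list
theorem pvWF_decomp : ∀ (pre : List String) {y : String} (suf : List String),
    pvIsOp y = true → pvWF (pre ++ y :: suf) = true →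
    ∃ pre' x z suf', pre = pre' ++ [x] ∧ suf = z :: suf' ∧ pvIsOp x = false ∧
      pvIsOp z = false ∧ ¬(x = "" ∧ z = "") := by
  suffices H : ∀ (n : Nat) (pre : List String) {y : String} (suf : List String),
      pre.length ≤ n → pvIsOp y = true → pvWF (pre ++ y :: suf) = true →
      ∃ pre' x z suf', pre = pre' ++ [x] ∧ suf = z :: suf' ∧ pvIsOp x = false ∧
        pvIsOp z = false ∧ ¬(x = "" ∧ z = "") by
    intro pre y suf hy h; exact H pre.length pre suf le_rfl hy h
  intro n
  induction n with
  | zero =>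
    intro pre y suf hlen hy h
    have : pre = [] := List.length_eq_zero_iff.mp (Nat.le_zero.mp hlen)
    subst this
    exact absurd (pvWF_headNonOp h) (by simp [hy])
  | succ n ih =>
    intro pre y suf hlen hy h
    match pre with
    | [] => exact absurd (pvWF_headNonOp h) (by simp [hy])
    | [x] =>
      have hx : pvIsOp x = false := pvWF_headNonOp h
      simp only [List.cons_append, List.nil_append, pvWF] at h
      rw [if_neg (by simp [hx]), if_pos hy] at h
      cases suf with
      | nil => simp at h
      | cons z suf' =>
        simp only [Bool.and_eq_true, Bool.not_eq_eq_eq_not, Bool.not_true,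
          Bool.and_eq_false_iff] at h
        refine ⟨[], x, z, suf', by simp, rfl, hx, pvWF_headNonOp h.2, ?_⟩
        rintro ⟨hx0, hz0⟩
        rcases h.1 with h1 | h1 <;> simp [hx0, hz0] at h1
    | a :: b :: pre2 =>
      have ha : pvIsOp a = false := pvWF_headNonOp h
      simp only [List.cons_append, pvWF] at h
      rw [if_neg (by simp [ha])] at h
      by_cases hb : pvIsOp b = true
      · rw [if_pos hb] at h
        -- scrutinee pre2 ++ y :: suf is nonempty
        have h2 : pvWF (pre2 ++ y :: suf) = true := by
          cases pre2 with
          | nil => simp only [List.nil_append, Bool.and_eq_true] at h; exact h.2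
          | cons c pre3 =>
            simp only [List.cons_append, Bool.and_eq_true] at h; exact h.2
        obtain ⟨pre', x, z, suf', hpe, hse, hx, hz, hne⟩ :=
          ih pre2 suf (by simp at hlen; omega) hy h2
        exact ⟨a :: b :: pre', x, z, suf', by simp [hpe], hse, hx, hz, hne⟩
      · rw [if_neg hb] at h
        obtain ⟨pre', x, z, suf', hpe, hse, hx, hz, hne⟩ :=
          ih (b :: pre2) suf (by simp at hlen ⊢; omega) hy (by simpa using h)
        exact ⟨a :: pre', x, z, suf', by simp [hpe], hse, hx, hz, hne⟩

-- unpacking pvWF at an operator in second position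
theorem pvWF_xyz {x y z : String} {suf : List String} (hy : pvIsOp y = true)
    (h : pvWF (x :: y :: z :: suf) = true) :
    pvIsOp x = false ∧ ¬(x = "" ∧ z = "") ∧ pvWF (z :: suf) = true := by
  have hx : pvIsOp x = false := pvWF_headNonOp h
  simp only [pvWF] at h
  rw [if_neg (by simp [hx]), if_pos hy] at h
  simp only [Bool.and_eq_true, Bool.not_eq_eq_eq_not, Bool.not_true,
    Bool.and_eq_false_iff] at h
  refine ⟨hx, ?_, h.2⟩
  rintro ⟨hx0, hz0⟩
  rcases h.1 with h1 | h1 <;> simp [hx0, hz0] at h1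

-- merging one operator preserves well-formedness
theorem pvWF_merge : ∀ (pre : List String) {x y z : String} (suf : List String),
    pvIsOp y = true → pvWF (pre ++ x :: y :: z :: suf) = true →
    pvWF (pre ++ (x ++ y ++ z) :: suf) = true := by
  intro pre x y z suf hy
  suffices H : ∀ (n : Nat) (pre : List String), pre.length ≤ n →
      pvWF (pre ++ x :: y :: z :: suf) = true →
      pvWF (pre ++ (x ++ y ++ z) :: suf) = true by
    exact H pre.length pre le_rfl
  intro n
  induction n with
  | zero =>
    intro pre hlen h
    have : pre = [] := List.length_eq_zero_iff.mp (Nat.le_zero.mp hlen)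
    subst this
    obtain ⟨_, hne, hz⟩ := pvWF_xyz hy (by simpa using h)
    obtain ⟨hM, hM0⟩ := pvMergedFacts hy hne
    simpa using pvWF_replaceHead hM hM0 hz
  | succ n ih =>
    intro pre hlen h
    match pre with
    | [] =>
      obtain ⟨_, hne, hz⟩ := pvWF_xyz hy (by simpa using h)
      obtain ⟨hM, hM0⟩ := pvMergedFacts hy hne
      simpa using pvWF_replaceHead hM hM0 hz
    | [a] =>
      have ha : pvIsOp a = false := pvWF_headNonOp h
      have hx : pvIsOp x = false := by
        by_cases hx' : pvIsOp x = true
        · exfalso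
          simp only [List.cons_append, List.nil_append, pvWF] at h
          rw [if_neg (by simp [ha]), if_pos hx'] at h
          simp only [Bool.and_eq_true] at h
          have h2 := h.2
          rw [if_pos hy] at h2
          simp at h2
        · simpa using hx'
      have h1 : pvWF (x :: y :: z :: suf) = true := by
        simp only [List.cons_append, List.nil_append, pvWF] at h
        rwa [if_neg (by simp [ha]), if_neg (by simp [hx])] at h
      obtain ⟨_, hne, hz⟩ := pvWF_xyz hy h1
      obtain ⟨hM, hM0⟩ := pvMergedFacts hy hne
      have h2 := pvWF_replaceHead hM hM0 hz
      simp only [List.cons_append, List.nil_append, pvWF]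
      rw [if_neg (by simp [ha]), if_neg (by simp [hM])]
      exact h2
    | a :: b :: pre2 =>
      have ha : pvIsOp a = false := pvWF_headNonOp h
      simp only [List.cons_append, pvWF] at h ⊢
      rw [if_neg (by simp [ha])] at h ⊢
      by_cases hb : pvIsOp b = true
      · rw [if_pos hb] at h ⊢
        cases pre2 with
        | nil =>
          simp only [List.nil_append, Bool.and_eq_true] at h
          obtain ⟨_, hne, hz⟩ := pvWF_xyz hy h.2
          obtain ⟨hM, hM0⟩ := pvMergedFacts hy hne
          have h2 := ih [] (by simp) (by simpa using h.2)
          simp only [List.nil_append, Bool.and_eq_true]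
          refine ⟨by simp [hM0], by simpa using h2⟩
        | cons c pre3 =>
          simp only [List.cons_append, Bool.and_eq_true] at h ⊢
          refine ⟨h.1, ?_⟩
          have := ih (c :: pre3) (by simp at hlen ⊢; omega) h.2
          simpa using this
      · rw [if_neg hb] at h ⊢
        have := ih (b :: pre2) (by simp at hlen ⊢; omega) (by simpa using h)
        simpa using this

-- merging one operator anywhere does not change the collapsed result
theorem pvCanon_merge : ∀ (pre : List String) {x y z : String} (suf : List String),
    pvIsOp y = true → pvWF (pre ++ x :: y :: z :: suf) = true →
    pvCanon (pre ++ (x ++ y ++ z) :: suf) = pvCanon (pre ++ x :: y :: z :: suf) := by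
  intro pre x y z suf hy
  suffices H : ∀ (n : Nat) (pre : List String) (x : String), pre.length ≤ n →
      pvWF (pre ++ x :: y :: z :: suf) = true →
      pvCanon (pre ++ (x ++ y ++ z) :: suf) = pvCanon (pre ++ x :: y :: z :: suf) by
    exact H pre.length pre x le_rfl
  intro n
  induction n with
  | zero =>
    intro pre x hlen h
    have : pre = [] := List.length_eq_zero_iff.mp (Nat.le_zero.mp hlen)
    subst this
    simp only [List.nil_append]
    rw [pvCanon]
    simp [hy]
  | succ n ih =>
    intro pre x hlen h
    match pre with
    | [] =>
      simp only [List.nil_append]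
      rw [pvCanon]
      simp [hy]
    | [a] =>
      have ha : pvIsOp a = false := pvWF_headNonOp h
      have hx : pvIsOp x = false := by
        by_cases hx' : pvIsOp x = true
        · exfalso
          simp only [List.cons_append, List.nil_append, pvWF] at h
          rw [if_neg (by simp [ha]), if_pos hx'] at h
          simp only [Bool.and_eq_true] at h
          have h2 := h.2
          rw [if_pos hy] at h2
          simp at h2
        · simpa using hx'
      have h1 : pvWF (x :: y :: z :: suf) = true := by
        simp only [List.cons_append, List.nil_append, pvWF] at h
        rwa [if_neg (by simp [ha]), if_neg (by simp [hx])] at h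
      obtain ⟨_, hne, _⟩ := pvWF_xyz hy h1
      obtain ⟨hM, _⟩ := pvMergedFacts hy hne
      simp only [List.cons_append, List.nil_append]
      rw [pvCanon_cons_nonop hM, pvCanon_cons_nonop hx]
      have := ih [] x (by simp) (by simpa using h1)
      simpa using this
    | a :: b :: pre2 =>
      have ha : pvIsOp a = false := pvWF_headNonOp h
      by_cases hb : pvIsOp b = true
      · cases pre2 with
        | nil =>
          -- a :: b :: x :: y :: z :: suf with b an operator: both sides take canon's merge step
          simp only [List.cons_append, List.nil_append] at h
          rw [pvWF_cons3, if_neg (by simp [ha]), if_pos hb] at h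
          simp only [Bool.and_eq_true, Bool.not_eq_eq_eq_not, Bool.not_true,
            Bool.and_eq_false_iff] at h
          have hax : ¬(a = "" ∧ x = "") := by
            rintro ⟨h1, h2⟩
            rcases h.1 with h3 | h3 <;> simp [h1, h2] at h3
          obtain ⟨hN, hN0⟩ := pvMergedFacts hb hax
          have hx : pvIsOp x = false := pvWF_headNonOp h.2
          have h1 : pvWF ((a ++ b ++ x) :: y :: z :: suf) = true :=
            pvWF_replaceHead hN hN0 h.2
          have step := ih [] (a ++ b ++ x) (by simp) (by simpa using h1)
          simp only [List.cons_append, List.nil_append] at step ⊢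
          conv_rhs => rw [pvCanon.eq_4]
          rw [if_pos hb, ← step,
            show a ++ b ++ x ++ y ++ z = a ++ b ++ (x ++ y ++ z) from by
              simp [String.append_assoc]]
          rw [pvCanon.eq_4, if_pos hb]
        | cons c pre3 =>
          simp only [List.cons_append] at h
          rw [pvWF_cons3, if_neg (by simp [ha]), if_pos hb] at h
          simp only [Bool.and_eq_true, Bool.not_eq_eq_eq_not,
            Bool.not_true, Bool.and_eq_false_iff] at h
          have hac : ¬(a = "" ∧ c = "") := by
            rintro ⟨h1, h2⟩
            rcases h.1 with h3 | h3 <;> simp [h1, h2] at h3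
          obtain ⟨hN, hN0⟩ := pvMergedFacts hb hac
          have h1 : pvWF ((a ++ b ++ c) :: pre3 ++ x :: y :: z :: suf) = true := by
            have := pvWF_replaceHead hN hN0 (x := c) (by simpa using h.2)
            simpa using this
          have step := ih ((a ++ b ++ c) :: pre3) x (by simp at hlen ⊢; omega) (by simpa using h1)
          simp only [List.cons_append]
          rw [pvCanon.eq_4, if_pos hb]
          conv_rhs => rw [pvCanon.eq_4]
          rw [if_pos hb]
          simpa using step
      · have hbf : pvIsOp b = false := by simpa using hb
        have h1 : pvWF (b :: pre2 ++ x :: y :: z :: suf) = true := by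
          simp only [List.cons_append, pvWF] at h
          rwa [if_neg (by simp [ha]), if_neg (by simp [hbf])] at h
        have step := ih (b :: pre2) x (by simp at hlen ⊢; omega) (by simpa using h1)
        simp only [List.cons_append]
        rw [pvCanon_cons_nonop hbf, pvCanon_cons_nonop hbf]
        simpa using step

theorem pvMerge_eq (op x z : String) (pre' suf' : List String)
    (hidx : PySem.List.index? (pre' ++ x :: op :: z :: suf') op = some (pre'.length + 1)) :
    pvMerge op (pre' ++ x :: op :: z :: suf') = pre' ++ (x ++ op ++ z) :: suf' := by
  unfold pvMerge
  rw [hidx]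
  dsimp only
  have hcast : (((pre'.length + 1 : Nat) : Int)) - 1 = ((pre'.length : Nat) : Int) := by
    push_cast; ring
  rw [hcast]
  have e1 : PySem.List.pop? (pre' ++ x :: op :: z :: suf') ((pre'.length : Nat) : Int)
      = some (x, pre' ++ op :: z :: suf') := by
    rw [PySem.List.pop?_natCast _ _ (by simp)]
    congr 1
    refine Prod.ext ?_ ?_
    · show (pre' ++ x :: op :: z :: suf')[pre'.length]'(by simp) = x
      rw [List.getElem_append_right (le_refl pre'.length)]
      simp
    · show (pre' ++ x :: op :: z :: suf').eraseIdx pre'.length = pre' ++ op :: z :: suf'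
      rw [List.eraseIdx_append]
      simp
  have e2 : PySem.List.pop? (pre' ++ op :: z :: suf') ((pre'.length : Nat) : Int)
      = some (op, pre' ++ z :: suf') := by
    rw [PySem.List.pop?_natCast _ _ (by simp)]
    congr 1
    refine Prod.ext ?_ ?_
    · show (pre' ++ op :: z :: suf')[pre'.length]'(by simp) = op
      rw [List.getElem_append_right (le_refl pre'.length)]; simp
    · show (pre' ++ op :: z :: suf').eraseIdx pre'.length = pre' ++ z :: suf'
      rw [List.eraseIdx_append]; simp
  have e3 : PySem.List.pop? (pre' ++ z :: suf') ((pre'.length : Nat) : Int)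
      = some (z, pre' ++ suf') := by
    rw [PySem.List.pop?_natCast _ _ (by simp)]
    congr 1
    refine Prod.ext ?_ ?_
    · show (pre' ++ z :: suf')[pre'.length]'(by simp) = z
      rw [List.getElem_append_right (le_refl pre'.length)]; simp
    · show (pre' ++ z :: suf').eraseIdx pre'.length = pre' ++ suf'
      rw [List.eraseIdx_append]; simp
  rw [e1]; dsimp only
  rw [e2]; dsimp only
  rw [e3]; dsimp only
  rw [PySem.List.insert_natCast _ _ _ (by simp)]
  simp

theorem pvMerge_not_mem {op : String} {l : List String} (h : op ∉ l) : pvMerge op l = l := by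
  unfold pvMerge
  rw [(PySem.List.index?_eq_none_iff l op).mpr h]

theorem pvCanon_noOps : ∀ (l : List String), pvNops l = 0 → pvCanon l = l := by
  intro l
  induction l with
  | nil => intro _; simp [pvCanon]
  | cons x t ih =>
    intro h
    have ht : pvNops t = 0 := by
      unfold pvNops at h ⊢
      rw [List.countP_cons] at h
      omega
    cases t with
    | nil => simp [pvCanon]
    | cons y t' =>
      have hy : pvIsOp y = false := by
        unfold pvNops at ht
        simp [List.countP_cons] at ht
        by_cases hy' : pvIsOp y = true
        · simp [hy'] at ht
        · simpa using hy'
      rw [pvCanon_cons_nonop hy, ih ht]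

-- one pvMerge step on a well-formed list
theorem pvMerge_step {op : String} {l : List String} (hop : pvIsOp op = true)
    (hwf : pvWF l = true) (hmem : op ∈ l) :
    pvWF (pvMerge op l) = true ∧ pvCanon (pvMerge op l) = pvCanon l ∧
      pvNops (pvMerge op l) + 1 = pvNops l := by
  obtain ⟨k, hk⟩ := Option.isSome_iff_exists.mp
    ((PySem.List.index?_isSome_iff l op).mpr hmem)
  obtain ⟨pre, suf, hl, hkl, hpre⟩ := (PySem.List.index?_eq_some_iff l op k).mp hk
  obtain ⟨pre', x, z, suf', hpe, hse, hx, hz, hne⟩ :=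
    pvWF_decomp pre suf hop (hl ▸ hwf)
  subst hpe hse hl
  have hidx : PySem.List.index? (pre' ++ x :: op :: z :: suf') op
      = some (pre'.length + 1) := by
    have : (pre' ++ [x]).length = k := hkl
    simp at this
    simpa [this] using hk
  have hme : pvMerge op ((pre' ++ [x]) ++ op :: z :: suf') = pre' ++ (x ++ op ++ z) :: suf' := by
    rw [show (pre' ++ [x]) ++ op :: z :: suf' = pre' ++ x :: op :: z :: suf' by simp]
    exact pvMerge_eq op x z pre' suf' hidx
  have hwf' : pvWF (pre' ++ x :: op :: z :: suf') = true := by simpa using hwf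
  obtain ⟨hM, _⟩ := pvMergedFacts hop hne
  refine ⟨?_, ?_, ?_⟩
  · rw [hme]; exact pvWF_merge pre' suf' hop hwf'
  · rw [hme]
    rw [show (pre' ++ [x]) ++ op :: z :: suf' = pre' ++ x :: op :: z :: suf' by simp]
    exact pvCanon_merge pre' suf' hop hwf'
  · rw [hme]
    unfold pvNops
    simp [List.countP_append, hx, hz, hM, hop]
    omega

theorem pvNops_zero_of_not_mem {l : List String} (h1 : "*" ∉ l) (h2 : "/" ∉ l) :
    pvNops l = 0 := by
  unfold pvNops
  rw [List.countP_eq_zero]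
  intro a ha
  have ha1 : a ≠ "*" := fun he => h1 (he ▸ ha)
  have ha2 : a ≠ "/" := fun he => h2 (he ▸ ha)
  simp [pvIsOp, ha1, ha2]

theorem pvLoopA_canon : ∀ (n : Nat) (l : List String), pvWF l = true → pvNops l ≤ n →
    pvLoopA n l = pvCanon l := by
  intro n
  induction n with
  | zero =>
    intro l hwf hn
    exact (pvCanon_noOps l (Nat.le_zero.mp hn)).symm
  | succ n ih =>
    intro l hwf hn
    rw [pvLoopA]
    by_cases h1 : "*" ∈ l
    · obtain ⟨hw1, hc1, hn1⟩ := pvMerge_step (by decide) hwf h1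
      by_cases h2 : "/" ∈ pvMerge "*" l
      · obtain ⟨hw2, hc2, hn2⟩ := pvMerge_step (by decide) hw1 h2
        rw [ih _ hw2 (by omega), hc2, hc1]
      · rw [pvMerge_not_mem h2, ih _ hw1 (by omega), hc1]
    · rw [pvMerge_not_mem h1]
      by_cases h2 : "/" ∈ l
      · obtain ⟨hw2, hc2, hn2⟩ := pvMerge_step (by decide) hwf h2
        rw [ih _ hw2 (by omega), hc2]
      · rw [pvMerge_not_mem h2]
        have h0 := pvNops_zero_of_not_mem h1 h2
        exact ih _ hwf (by omega)

theorem pvCount_eq_nops (l : List String) :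
    PySem.List.count l "*" + PySem.List.count l "/" = pvNops l := by
  induction l with
  | nil => rfl
  | cons a t ih =>
    simp only [PySem.List.count_eq, List.count_cons] at ih ⊢
    unfold pvNops at ih ⊢
    simp only [List.countP_cons]
    by_cases ha : a = "*"
    · simp [ha, pvIsOp]; omega
    · by_cases hb : a = "/"
      · simp [hb, pvIsOp]; omega
      · simp [pvIsOp, beq_eq_false_iff_ne.mpr ha, beq_eq_false_iff_ne.mpr hb]
        omega

theorem pvLoopB_canon : ∀ (v : List String) (m : String) (out : List String),
    pvWF (m :: v) = true → pvLoopB (out ++ [m]) v = out ++ pvCanon (m :: v) := by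
  suffices H : ∀ (n : Nat) (v : List String), v.length ≤ n → ∀ (m : String) (out : List String),
      pvWF (m :: v) = true → pvLoopB (out ++ [m]) v = out ++ pvCanon (m :: v) by
    intro v m out h; exact H v.length v le_rfl m out h
  intro n
  induction n with
  | zero =>
    intro v hlen m out h
    have : v = [] := List.length_eq_zero_iff.mp (Nat.le_zero.mp hlen)
    subst this
    simp [pvLoopB, pvCanon]
  | succ n ih =>
    intro v hlen m out h
    have hm : pvIsOp m = false := pvWF_headNonOp h
    cases v with
    | nil => simp [pvLoopB, pvCanon]
    | cons y v' =>
      by_cases hy : pvIsOp y = true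
      · -- y is an operator: merge it into m
        cases v' with
        | nil =>
          exfalso
          simp only [pvWF] at h
          rw [if_neg (by simp [hm]), if_pos hy] at h
          simp at h
        | cons z v'' =>
          obtain ⟨_, hne, hz⟩ := pvWF_xyz hy h
          obtain ⟨hM, hM0⟩ := pvMergedFacts hy hne
          rw [pvLoopB]
          rw [if_pos (by simpa [pvIsOp] using hy)]
          rw [PySem.List.pop?_last]
          dsimp only
          have hwf2 : pvWF ((m ++ y ++ z) :: v'') = true := pvWF_replaceHead hM hM0 hz
          have := ih v'' (by simp at hlen; omega) (m ++ y ++ z) out hwf2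
          rw [this]
          rw [pvCanon.eq_4, if_pos hy]
      · -- ordinary token: append it
        have hyf : pvIsOp y = false := by simpa using hy
        rw [pvLoopB]
        rw [if_neg (by simpa [pvIsOp] using hy)]
        have hwf2 : pvWF (y :: v') = true := by
          simp only [pvWF] at h
          rwa [if_neg (by simp [hm]), if_neg (by simp [hyf])] at h
        have := ih v' (by simp at hlen; omega) y (out ++ [m]) hwf2
        rw [show (out ++ [m]) ++ [y] = out ++ [m] ++ [y] by simp] at this ⊢
        rw [this, pvCanon_cons_nonop hyf]
        simp

-- ===== VERDICT (by name: the statement is the Claim_ definition above) =====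
theorem deal_opetator_spec : Claim_equal_deal_opetator := by
  intro l _ hwf
  unfold Spec_deal_opetator deal_opetator deal_opetator_alt
  rw [pvCount_eq_nops, pvLoopA_canon _ _ hwf le_rfl]
  cases l with
  | nil => simp [pvLoopB, pvCanon]
  | cons x rest =>
    have hx : pvIsOp x = false := pvWF_headNonOp hwf
    rw [pvLoopB]
    simp only [pvIsOp] at hx
    rw [if_neg (by simp_all)]
    simpa using (pvLoopB_canon rest x [] hwf).symm
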